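-- pv_equiv track=rewrite | github.com/ukit3ro/school-project | buttlerfly.py | Dragon
-- ===== SOURCE A (Python) =====
-- def Dragon(iteration):
--     seq = "FX"
--     seq2 = ""
--
--     for _ in range(iteration):
--         for char in seq:
--             if char == "X":
--                 seq2 += "X+YF+"
--             elif char == "Y":
--                 seq2 += "-FX-Y"
--             else:
--                 seq2 += char
--         seq = seq2
--         seq2 = ""
--
--     return seq
-- ===== SOURCE B (Python) =====
-- def Dragon(iteration):
--     def expand(sym, k):
--         if k <= 0 or sym not in "XY":
--             return sym
--         if sym == "X":
--             return expand("X", k - 1) + "+" + expand("Y", k - 1) + "F" + "+"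
--         return "-" + "F" + expand("X", k - 1) + "-" + expand("Y", k - 1)
--     return expand("F", iteration) + expand("X", iteration)
-- ===== Notes on version B (the rewrite author's own statement) =====
-- stated objective: alternative
-- what changed: Replaced the iterative level-by-level string rewriting over the whole sequence with a depth-first recursive per-symbol expansion of the seed 'FX' over the rewrite depth.
import Mathlib
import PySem

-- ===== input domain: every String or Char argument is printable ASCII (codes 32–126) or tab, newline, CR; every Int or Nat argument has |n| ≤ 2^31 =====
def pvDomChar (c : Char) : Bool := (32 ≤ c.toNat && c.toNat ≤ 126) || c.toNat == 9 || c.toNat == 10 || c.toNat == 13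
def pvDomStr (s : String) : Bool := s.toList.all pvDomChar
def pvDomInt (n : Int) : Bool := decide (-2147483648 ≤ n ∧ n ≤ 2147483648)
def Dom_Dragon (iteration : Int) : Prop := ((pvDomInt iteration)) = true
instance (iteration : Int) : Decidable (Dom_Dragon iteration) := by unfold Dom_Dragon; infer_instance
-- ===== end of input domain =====

-- B replaces the level-by-level rewriting with depth-first per-symbol recursion; same output (alternative decomposition).

-- ===== PORT A =====
-- inner loop body: seq2 += "X+YF+" / "-FX-Y" / char   (strings as List Char)
def DragonStepA (seq2 : List Char) (c : Char) : List Char :=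
  if c = 'X' then seq2 ++ "X+YF+".toList
  else if c = 'Y' then seq2 ++ "-FX-Y".toList
  else seq2 ++ [c]

def Dragon (iteration : Int) : String :=
  String.ofList ((PySem.List.pyRange 0 iteration 1).foldl
    (fun seq _ => seq.foldl DragonStepA []) "FX".toList)

-- ===== PORT B =====
-- expand(sym, k): fuel k (k ≤ 0 in Python ↔ fuel 0 here)
def DragonExpand (c : Char) : Nat → List Char
  | 0 => [c]
  | k+1 =>
    if c = 'X' then
      DragonExpand 'X' k ++ "+".toList ++ DragonExpand 'Y' k ++ "F".toList ++ "+".toList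
    else if c = 'Y' then
      "-".toList ++ "F".toList ++ DragonExpand 'X' k ++ "-".toList ++ DragonExpand 'Y' k
    else [c]

def Dragon_alt (iteration : Int) : String :=
  String.ofList (DragonExpand 'F' iteration.toNat ++ DragonExpand 'X' iteration.toNat)

-- ===== PRECONDITION & SPEC =====
def Spec_Dragon (iteration : Int) (out : String) : Prop := out = Dragon_alt iteration
instance (iteration : Int) (out : String) : Decidable (Spec_Dragon iteration out) := by unfold Spec_Dragon; infer_instance

-- ===== CLAIM (what is proved, stated in full; the proofs are below) =====
def Claim_equal_Dragon : Prop := ∀ (iteration : Int), Dom_Dragon iteration → Spec_Dragon iteration (Dragon iteration)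

-- ===== LEMMAS AND PROOFS =====

-- the rewrite rule of one symbol
def DragonRule (c : Char) : List Char :=
  if c = 'X' then "X+YF+".toList else if c = 'Y' then "-FX-Y".toList else [c]

-- one whole rewriting pass
def DragonStep (l : List Char) : List Char := l.flatMap DragonRule

-- A's outer loop as Nat recursion
def DragonLoop : Nat → List Char → List Char
  | 0, s => s
  | n+1, s => DragonLoop n (DragonStep s)

-- symbol-wise expansion of a whole string
def DragonE (k : Nat) (l : List Char) : List Char := l.flatMap (fun c => DragonExpand c k)

theorem dragon_foldl_step (l : List Char) (acc : List Char) :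
    l.foldl DragonStepA acc = acc ++ DragonStep l := by
  induction l generalizing acc with
  | nil => simp [DragonStep]
  | cons c l ih =>
    simp only [List.foldl_cons, ih, DragonStep, List.flatMap_cons, DragonStepA, DragonRule]
    split_ifs <;> simp

theorem dragon_expand_other (c : Char) (hX : c ≠ 'X') (hY : c ≠ 'Y') (k : Nat) :
    DragonExpand c k = [c] := by
  cases k <;> simp [DragonExpand, hX, hY]

theorem dragon_expand_succ (c : Char) (k : Nat) :
    DragonExpand c (k+1) = DragonE k (DragonRule c) := by
  by_cases hX : c = 'X'
  · subst hX
    simp [DragonExpand, DragonRule, DragonE,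
      dragon_expand_other '+' (by decide) (by decide),
      dragon_expand_other 'F' (by decide) (by decide)]
  · by_cases hY : c = 'Y'
    · subst hY
      simp [DragonExpand, DragonRule, DragonE,
        dragon_expand_other '-' (by decide) (by decide),
        dragon_expand_other 'F' (by decide) (by decide)]
    · simp [DragonExpand, DragonRule, DragonE, hX, hY,
        dragon_expand_other c hX hY]

theorem dragonE_succ (k : Nat) (l : List Char) :
    DragonE (k+1) l = DragonE k (DragonStep l) := by
  induction l with
  | nil => simp [DragonE, DragonStep]
  | cons c l ih =>
    simp only [DragonE, DragonStep, List.flatMap_cons, List.flatMap_append] at *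
    rw [dragon_expand_succ]
    simp [DragonE, ih]

theorem dragonLoop_eq_E (n : Nat) (l : List Char) :
    DragonLoop n l = DragonE n l := by
  induction n generalizing l with
  | zero => simp [DragonLoop, DragonE, DragonExpand]
  | succ n ih => rw [DragonLoop, ih, ← dragonE_succ]

theorem dragonLoop_of_foldl {α : Type} (l : List α) (init : List Char) :
    l.foldl (fun s _ => s.foldl DragonStepA []) init = DragonLoop l.length init := by
  induction l generalizing init with
  | nil => rfl
  | cons a l ih =>
    simp only [List.foldl_cons, List.length_cons, DragonLoop]
    rw [ih, dragon_foldl_step]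
    simp

-- ===== VERDICT (by name: the statement is the Claim_ definition above) =====
theorem Dragon_spec : Claim_equal_Dragon := by
  intro iteration _
  unfold Spec_Dragon Dragon Dragon_alt
  rw [dragonLoop_of_foldl, PySem.List.length_pyRange_one, dragonLoop_eq_E]
  have : (iteration - 0).toNat = iteration.toNat := by omega
  rw [this]
  simp [DragonE]
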